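-- pv_equiv track=rewrite | github.com/vera-nov/vk-algorithms | hw1/tests/test_task4_sortArray01.py | is_sorted_01
-- ===== SOURCE A (Python) =====
-- def is_sorted_01(a):
--     seen_one = False
--     for x in a:
--         if x == 1:
--             seen_one = True
--         elif x == 0:
--             if seen_one:
--                 return False
--         else:
--             return False
--     return True
-- ===== SOURCE B (Python) =====
-- def is_sorted_01(a):
--     it = iter(a)
--     for x in it:
--         if x != 0:
--             if x != 1:
--                 return False
--             break
--     for x in it:
--         if x != 1:
--             return False
--     return True
-- ===== Notes on version B (the rewrite author's own statement) =====
-- stated objective: alternative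
-- what changed: Replaces A's single pass with a seen_one flag by two sequential phases over one shared iterator: consume leading zeros, then require every remaining element to equal 1 (no flag state).
import Mathlib
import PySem

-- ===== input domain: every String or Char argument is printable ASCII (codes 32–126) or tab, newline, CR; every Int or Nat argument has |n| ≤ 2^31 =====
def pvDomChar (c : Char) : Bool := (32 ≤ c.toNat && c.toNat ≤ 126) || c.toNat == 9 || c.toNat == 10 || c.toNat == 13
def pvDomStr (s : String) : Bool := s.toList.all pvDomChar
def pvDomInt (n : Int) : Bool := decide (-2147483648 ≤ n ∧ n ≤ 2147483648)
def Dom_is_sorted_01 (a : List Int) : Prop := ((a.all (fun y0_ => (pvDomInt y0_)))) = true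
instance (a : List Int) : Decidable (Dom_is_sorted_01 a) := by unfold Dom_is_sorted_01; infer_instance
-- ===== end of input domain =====

-- B replaces A's flag-carrying single pass by two sequential phases (skip zeros, then all-ones); alternative decomposition, same cost.


-- ===== PORT A =====
-- seen_one flag carried through the single loop; early return on 0-after-1 or non-binary
def pvAloop (seen : Bool) : List Int → Bool
  | [] => true
  | x :: xs =>
    if x = 1 then pvAloop true xs
    else if x = 0 then (if seen then false else pvAloop seen xs)
    else false

def is_sorted_01 (a : List Int) : Bool := pvAloop false a

-- ===== PORT B =====
-- B: phase 2 — every remaining element must equal 1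
def pvOnes : List Int → Bool
  | [] => true
  | x :: xs => if x ≠ 1 then false else pvOnes xs

-- B: phase 1 — consume leading zeros, check the first non-zero is 1, hand off to phase 2
def is_sorted_01_alt : List Int → Bool
  | [] => true
  | x :: xs =>
    if x ≠ 0 then (if x ≠ 1 then false else pvOnes xs)
    else is_sorted_01_alt xs

-- ===== PRECONDITION & SPEC =====
def Spec_is_sorted_01 (a : List Int) (out : Bool) : Prop := out = is_sorted_01_alt a
instance (a : List Int) (out : Bool) : Decidable (Spec_is_sorted_01 a out) := by unfold Spec_is_sorted_01; infer_instance

-- ===== CLAIM (what is proved, stated in full; the proofs are below) =====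
def Claim_equal_is_sorted_01 : Prop := ∀ (a : List Int), Dom_is_sorted_01 a → Spec_is_sorted_01 a (is_sorted_01 a)

-- ===== LEMMAS AND PROOFS =====

-- ===== VERDICT (by name: the statement is the Claim_ definition above) =====
theorem pvAloop_true (a : List Int) : pvAloop true a = pvOnes a := by
  induction a with
  | nil => rfl
  | cons x xs ih =>
    simp only [pvAloop, pvOnes]
    by_cases h1 : x = 1 <;> by_cases h0 : x = 0 <;> simp [h1, h0, ih]

theorem pvAloop_false (a : List Int) : pvAloop false a = is_sorted_01_alt a := by
  induction a with
  | nil => rfl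
  | cons x xs ih =>
    simp only [pvAloop, is_sorted_01_alt]
    by_cases h1 : x = 1 <;> by_cases h0 : x = 0 <;>
      simp [h1, h0, ih, pvAloop_true]

theorem is_sorted_01_spec : Claim_equal_is_sorted_01 := by
  intro a _
  unfold Spec_is_sorted_01 is_sorted_01
  exact pvAloop_false a
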